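-- pv_equiv track=rewrite | github.com/blairmunk/LasyTeacher | school_task_db/document_generator/utils/formula_utils.py | _calculate_nesting_level
-- ===== SOURCE A (Python) =====
-- def _calculate_nesting_level(text: str) -> int:
--     """Вычисляет уровень вложенности команд"""
--     max_level = 0
--     current_level = 0
--
--     i = 0
--     while i < len(text):
--         if text[i] == '{':
--             current_level += 1
--             max_level = max(max_level, current_level)
--         elif text[i] == '}':
--             current_level = max(0, current_level - 1)
--         elif text[i:i+6] == '\\frac{':
--             current_level += 2  # \frac добавляет 2 уровня вложенности
--             max_level = max(max_level, current_level)
--             i += 5  # Пропускаем \frac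
--         i += 1
--
--     return max_level
-- ===== SOURCE B (Python) =====
-- def _calculate_nesting_level(text: str) -> int:
--     # Reduce to a maximum-subarray-sum problem: map tokens to depth deltas
--     # (+1 for '{', -1 for '}', +2 for '\frac{' which consumes its brace);
--     # the max nesting level equals the maximum (possibly empty) contiguous
--     # subarray sum of the deltas, computed by divide and conquer.
--     deltas = []
--     i = 0
--     n = len(text)
--     while i < n:
--         ch = text[i]
--         if ch == '{':
--             deltas.append(1); i += 1
--         elif ch == '}':
--             deltas.append(-1); i += 1
--         elif text[i:i+6] == '\\frac{':
--             deltas.append(2); i += 6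
--         else:
--             i += 1
--     def solve(lo, hi):
--         # (total, best, best-prefix, best-suffix) of deltas[lo:hi]; empty subarray allowed
--         if lo == hi:
--             return (0, 0, 0, 0)
--         if hi - lo == 1:
--             d = deltas[lo]
--             m = max(0, d)
--             return (d, m, m, m)
--         mid = (lo + hi) // 2
--         tl, bl, pl, sl = solve(lo, mid)
--         tr, br, pr, sr = solve(mid, hi)
--         return (tl + tr, max(bl, br, sl + pr), max(pl, tl + pr), max(sr, sl + tr))
--     return solve(0, len(deltas))[1]
-- ===== Notes on version B (the rewrite author's own statement) =====
-- stated objective: alternative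
-- what changed: B reduces the problem to maximum-subarray-sum: it tokenizes the text into depth deltas (+1/-1/+2, the \frac{ token consuming its brace) and computes the maximum (possibly empty) contiguous subarray sum of the deltas by divide and conquer, instead of A's single pass with a clamped running depth and running max; correctness rests on the identity max clamped depth = max subarray sum of deltas.
import Mathlib
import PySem

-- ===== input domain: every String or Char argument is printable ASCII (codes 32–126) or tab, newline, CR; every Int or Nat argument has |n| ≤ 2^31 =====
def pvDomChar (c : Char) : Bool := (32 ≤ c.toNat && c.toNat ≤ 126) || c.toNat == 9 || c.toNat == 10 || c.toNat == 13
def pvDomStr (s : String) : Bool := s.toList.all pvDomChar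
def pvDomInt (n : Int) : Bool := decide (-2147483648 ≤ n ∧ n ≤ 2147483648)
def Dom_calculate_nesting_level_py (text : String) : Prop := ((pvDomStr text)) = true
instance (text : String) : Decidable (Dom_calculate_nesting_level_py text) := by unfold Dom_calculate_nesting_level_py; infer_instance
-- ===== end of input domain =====

-- B tokenizes the text into depth deltas and computes the maximum (possibly empty)
-- contiguous subarray sum by divide and conquer, instead of A's clamped running-depth scan
-- (objective: alternative algorithm, same behaviour).

-- ===== PORT A =====
-- A's while loop over the index i becomes structural recursion over the remaining suffix;
-- text[i:i+6] is the take-6 of the suffix, and 'i += 5; i += 1' is the drop of 5 further chars.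
def pvLoopA : List Char → Int → Int → Int
  | [], _, maxLevel => maxLevel
  | c :: rest, currentLevel, maxLevel =>
    if c = '{' then
      pvLoopA rest (currentLevel + 1) (max maxLevel (currentLevel + 1))
    else if c = '}' then
      pvLoopA rest (max 0 (currentLevel - 1)) maxLevel
    else if (c :: rest).take 6 = "\\frac{".toList then
      pvLoopA (rest.drop 5) (currentLevel + 2) (max maxLevel (currentLevel + 2))
    else
      pvLoopA rest currentLevel maxLevel
termination_by l => l.length
decreasing_by
  all_goals simp

def calculate_nesting_level_py (text : String) : Int :=
  pvLoopA text.toList 0 0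

-- ===== PORT B =====
-- Source B's tokenizing while loop: '{' → +1, '}' → -1, '\frac{' → +2 consuming 6 chars.
def pvTok : List Char → List Int
  | [] => []
  | c :: t =>
    if c = '{' then 1 :: pvTok t
    else if c = '}' then (-1) :: pvTok t
    else if (c :: t).take 6 = "\\frac{".toList then 2 :: pvTok (t.drop 5)
    else pvTok t
termination_by l => l.length
decreasing_by
  all_goals simp

-- Source B's solve(lo, hi): divide and conquer on the delta list, returning
-- (total, best subarray sum, best prefix sum, best suffix sum), empty subarray allowed.
def pvSolve : List Int → Int × Int × Int × Int
  | [] => (0, 0, 0, 0)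
  | [d] => (d, max 0 d, max 0 d, max 0 d)
  | a :: b :: t =>
    let l := a :: b :: t
    let k := l.length / 2
    let L := pvSolve (l.take k)
    let R := pvSolve (l.drop k)
    (L.1 + R.1, max L.2.1 (max R.2.1 (L.2.2.2 + R.2.2.1)),
     max L.2.2.1 (L.1 + R.2.2.1), max R.2.2.2 (L.2.2.2 + R.1))
termination_by l => l.length
decreasing_by
  · simp [List.length_take]; omega
  · simp; omega

def calculate_nesting_level_py_alt (text : String) : Int :=
  (pvSolve (pvTok text.toList)).2.1

-- ===== PRECONDITION & SPEC =====
def Spec_calculate_nesting_level_py (text : String) (out : Int) : Prop := out = calculate_nesting_level_py_alt text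
instance (text : String) (out : Int) : Decidable (Spec_calculate_nesting_level_py text out) := by unfold Spec_calculate_nesting_level_py; infer_instance

-- ===== CLAIM (what is proved, stated in full; the proofs are below) =====
def Claim_equal_calculate_nesting_level_py : Prop := ∀ (text : String), Dom_calculate_nesting_level_py text → Spec_calculate_nesting_level_py text (calculate_nesting_level_py text)

-- ===== LEMMAS AND PROOFS =====

-- specification values over a delta list: best prefix sum, best suffix sum, best subarray sum
def pvPre : List Int → Int
  | [] => 0
  | d :: t => max 0 (d + pvPre t)

def pvSuf : List Int → Int
  | [] => 0
  | d :: t => max (pvSuf t) (d + t.sum)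

def pvBest : List Int → Int
  | [] => 0
  | d :: t => max (pvBest t) (d + pvPre t)

theorem pvPre_nonneg : ∀ l : List Int, 0 ≤ pvPre l
  | [] => le_refl 0
  | _ :: t => by simp [pvPre]

theorem pvBest_ge_pre : ∀ l : List Int, pvPre l ≤ pvBest l
  | [] => le_refl 0
  | d :: t => by
    have h1 := pvBest_ge_pre t
    have h2 := pvPre_nonneg t
    simp only [pvPre, pvBest]; omega

theorem pvBest_nonneg (l : List Int) : 0 ≤ pvBest l :=
  le_trans (pvPre_nonneg l) (pvBest_ge_pre l)

theorem pvSuf_ge_sum : ∀ l : List Int, l.sum ≤ pvSuf l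
  | [] => le_refl 0
  | d :: t => by simp only [pvSuf, List.sum_cons]; omega

theorem pvPre_append : ∀ (a b : List Int), pvPre (a ++ b) = max (pvPre a) (a.sum + pvPre b)
  | [], b => by have := pvPre_nonneg b; simp [pvPre]; omega
  | d :: a, b => by
    have ih := pvPre_append a b
    simp only [List.cons_append, pvPre, List.sum_cons, ih]; omega

theorem pvSuf_append : ∀ (a b : List Int), pvSuf (a ++ b) = max (pvSuf b) (pvSuf a + b.sum)
  | [], b => by have := pvSuf_ge_sum b; simp [pvSuf]; omega
  | d :: a, b => by
    have ih := pvSuf_append a b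
    simp only [List.cons_append, pvSuf, List.sum_append, ih]; omega

theorem pvBest_append : ∀ (a b : List Int),
    pvBest (a ++ b) = max (pvBest a) (max (pvBest b) (pvSuf a + pvPre b))
  | [], b => by
    have h1 := pvBest_ge_pre b
    have h2 := pvBest_nonneg b
    simp [pvBest, pvSuf]; omega
  | d :: a, b => by
    have ih := pvBest_append a b
    have hp := pvPre_append a b
    simp only [List.cons_append, pvBest, pvSuf, ih, hp]; omega

theorem pvSolve_eq : ∀ l : List Int, pvSolve l = (l.sum, pvBest l, pvPre l, pvSuf l)
  | [] => by simp [pvSolve, pvPre, pvSuf, pvBest]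
  | [d] => by
    simp only [pvSolve, List.sum_cons, List.sum_nil, pvPre, pvSuf, pvBest, Prod.ext_iff]
    omega
  | a :: b :: t => by
    have ih1 := pvSolve_eq ((a :: b :: t).take ((a :: b :: t).length / 2))
    have ih2 := pvSolve_eq ((a :: b :: t).drop ((a :: b :: t).length / 2))
    simp only [pvSolve, ih1, ih2]
    have hsplit : a :: b :: t = (a :: b :: t).take ((a :: b :: t).length / 2) ++
        (a :: b :: t).drop ((a :: b :: t).length / 2) := (List.take_append_drop _ _).symm
    conv_rhs => rw [hsplit]
    rw [List.sum_append, pvBest_append, pvPre_append, pvSuf_append]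
termination_by l => l.length
decreasing_by
  · simp [List.length_take]; omega
  · simp; omega

-- g cur ds = maximum clamped depth reached along ds starting from depth cur (including cur)
def pvG : Int → List Int → Int
  | cur, [] => cur
  | cur, d :: t => max cur (pvG (max 0 (cur + d)) t)

theorem pvG_ge : ∀ (cur : Int) (l : List Int), cur ≤ pvG cur l
  | _, [] => le_refl _
  | cur, d :: t => by simp [pvG]

theorem pvG_eq : ∀ (l : List Int) (cur : Int), 0 ≤ cur →
    pvG cur l = max (cur + pvPre l) (pvBest l)
  | [], cur, h => by simp [pvG, pvPre, pvBest]; omega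
  | d :: t, cur, h => by
    have ih := pvG_eq t (max 0 (cur + d)) (by omega)
    have h1 := pvPre_nonneg t
    have h2 := pvBest_ge_pre t
    simp only [pvG, pvPre, pvBest, ih]; omega

-- the token-level reading of A's loop: clamp the depth, record the max only at increments
def pvRun : List Int → Int → Int → Int
  | [], _, mx => mx
  | d :: t, cur, mx =>
    if 0 < d then pvRun t (max 0 (cur + d)) (max mx (max 0 (cur + d)))
    else pvRun t (max 0 (cur + d)) mx

theorem pvRun_eq : ∀ (l : List Int) (cur mx : Int), 0 ≤ cur → cur ≤ mx →
    pvRun l cur mx = max mx (pvG cur l)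
  | [], cur, mx, h1, h2 => by simp [pvRun, pvG]; omega
  | d :: t, cur, mx, h1, h2 => by
    have hg := pvG_ge (max 0 (cur + d)) t
    by_cases hd : 0 < d
    · have ih := pvRun_eq t (max 0 (cur + d)) (max mx (max 0 (cur + d))) (by omega) (by omega)
      simp only [pvRun, if_pos hd, ih, pvG]; omega
    · have ih := pvRun_eq t (max 0 (cur + d)) mx (by omega) (by omega)
      simp only [pvRun, if_neg hd, ih, pvG]; omega

theorem pvLoopA_run : ∀ (l : List Char) (cur mx : Int), 0 ≤ cur →
    pvLoopA l cur mx = pvRun (pvTok l) cur mx := by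
  intro l cur mx h
  induction l, cur, mx using pvLoopA.induct with
  | case1 cur mx => simp [pvLoopA, pvTok, pvRun]
  | case2 rest cur mx ih =>
    rw [pvLoopA, if_pos rfl, pvTok, if_pos rfl, pvRun, if_pos (by norm_num)]
    rw [show max (0 : Int) (cur + 1) = cur + 1 from by omega]
    exact ih (by omega)
  | case3 rest cur mx h1 ih =>
    rw [pvLoopA, if_neg h1, if_pos rfl, pvTok, if_neg h1, if_pos rfl, pvRun,
      if_neg (by norm_num)]
    rw [show max (0 : Int) (cur + -1) = max 0 (cur - 1) from by omega]
    exact ih (by omega)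
  | case4 c rest cur mx h1 h2 h3 ih =>
    rw [pvLoopA, if_neg h1, if_neg h2, if_pos h3, pvTok, if_neg h1, if_neg h2, if_pos h3,
      pvRun, if_pos (by norm_num)]
    rw [show max (0 : Int) (cur + 2) = cur + 2 from by omega]
    exact ih (by omega)
  | case5 c rest cur mx h1 h2 h3 ih =>
    rw [pvLoopA, if_neg h1, if_neg h2, if_neg h3, pvTok, if_neg h1, if_neg h2, if_neg h3]
    exact ih h

-- ===== VERDICT (by name: the statement is the Claim_ definition above) =====
theorem calculate_nesting_level_py_spec : Claim_equal_calculate_nesting_level_py := by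
  intro text _
  show pvLoopA text.toList 0 0 = (pvSolve (pvTok text.toList)).2.1
  rw [pvLoopA_run _ _ _ (le_refl 0), pvRun_eq _ _ _ (le_refl 0) (le_refl 0),
    pvG_eq _ _ (le_refl 0), pvSolve_eq]
  have h1 := pvPre_nonneg (pvTok text.toList)
  have h2 := pvBest_ge_pre (pvTok text.toList)
  simp only []
  omega
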